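-- pv_equiv track=rewrite | github.com/mcsltd/ecganncmp | utils/statementsstats.py | _compare_statements
-- ===== SOURCE A (Python) =====
-- from collections import namedtuple, OrderedDict, defaultdict
-- from enum import IntEnum, auto
--
-- class MatchMarks(IntEnum):
--     TP = auto()
--     FN = auto()
--     FP = auto()
--
-- def _compare_statements(ref_data, test_data, thesaurus, code_unions=None,
--                         strict=False):
--     excess_items = set()
--     marks = defaultdict(list)
--     for db in ref_data:
--         if db not in test_data:
--             continue
--         for rec in ref_data[db]:
--             if rec not in test_data[db]:
--                 continue
--             ref_concs = set(ref_data[db][rec])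
--             test_concs = set(test_data[db][rec])
--             all_concs = ref_concs.union(test_concs)
--             for code in all_concs:
--                 if code in excess_items:
--                     continue
--                 if _ignore_statement(code, thesaurus, code_unions, strict):
--                     excess_items.add(code)
--                     continue
--                 other_set = None
--                 if code not in ref_concs:
--                     mark = MatchMarks.FP
--                     other_set = ref_concs
--                 elif code in test_concs:
--                     mark = MatchMarks.TP
--                 else:
--                     mark = MatchMarks.FN
--                     other_set = test_concs
--                 marks[code].append(mark)
--
--                 if code_unions is None or other_set is None:
--                     continue
--                 _, groups_union = _select_code_union(code, code_unions)
--                 if groups_union is None: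
--                     continue
--                 if any(x in groups_union for x in other_set):
--                     marks[code][-1] = MatchMarks.TP
--     return marks
--
-- def _select_code_union(code, unions):
--     if unions is None:
--         return (None, None)
--     return next((gu for gu in unions.items() if code in gu[1]), (None, None))
--
-- def _ignore_statement(code, thesaurus, unions=None, strict=False):
--     if code not in thesaurus:
--         return True
--     if unions is not None and strict:
--         return _select_code_union(code, unions)[0] is None
--     return False
-- ===== SOURCE B (Python) =====
-- TP = 1
-- FN = 2
-- FP = 3
--
--
-- def _compare_statements(ref_data, test_data, thesaurus, code_unions=None,
--                         strict=False):
--     # Multi-index: code -> names of ALL unions containing it, in union order.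
--     unions_of = {}
--     if code_unions is not None:
--         for name, members in code_unions.items():
--             for c in members:
--                 unions_of.setdefault(c, []).append(name)
--     # Stage 1: the matched (ref codes, test codes) record pairs.
--     pairs = [(set(ref_recs[rec]), set(test_data[db][rec]))
--              for db, ref_recs in ref_data.items() if db in test_data
--              for rec in ref_recs if rec in test_data[db]]
--     marks = {}
--     for ref_concs, test_concs in pairs:
--         # Union groups touched by each side of this record, computed once.
--         ref_hit = {u for x in ref_concs for u in unions_of.get(x, ())}
--         test_hit = {u for x in test_concs for u in unions_of.get(x, ())}
--         for code in ref_concs | test_concs: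
--             if code not in thesaurus:
--                 continue
--             groups = unions_of.get(code, [])
--             if strict and code_unions is not None and not groups:
--                 continue
--             in_ref = code in ref_concs
--             in_test = code in test_concs
--             if in_ref and in_test:
--                 mark = TP
--             elif groups and groups[0] in (test_hit if in_ref else ref_hit):
--                 mark = TP
--             else:
--                 mark = FN if in_ref else FP
--             marks.setdefault(code, []).append(mark)
--     return marks
-- ===== Notes on version B (the rewrite author's own statement) =====
-- stated objective: alternative
-- what changed: B first stages the matched record pairs, builds once a multi-index code->all unions containing it and, per record, the set of union groups hit by each side, so each code is classified by O(1) group lookups instead of A's per-code linear scan of code_unions plus per-code any() scan over the other record's codes; A's excess-items memo set and append-then-overwrite-last marks update disappear.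
import Mathlib
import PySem

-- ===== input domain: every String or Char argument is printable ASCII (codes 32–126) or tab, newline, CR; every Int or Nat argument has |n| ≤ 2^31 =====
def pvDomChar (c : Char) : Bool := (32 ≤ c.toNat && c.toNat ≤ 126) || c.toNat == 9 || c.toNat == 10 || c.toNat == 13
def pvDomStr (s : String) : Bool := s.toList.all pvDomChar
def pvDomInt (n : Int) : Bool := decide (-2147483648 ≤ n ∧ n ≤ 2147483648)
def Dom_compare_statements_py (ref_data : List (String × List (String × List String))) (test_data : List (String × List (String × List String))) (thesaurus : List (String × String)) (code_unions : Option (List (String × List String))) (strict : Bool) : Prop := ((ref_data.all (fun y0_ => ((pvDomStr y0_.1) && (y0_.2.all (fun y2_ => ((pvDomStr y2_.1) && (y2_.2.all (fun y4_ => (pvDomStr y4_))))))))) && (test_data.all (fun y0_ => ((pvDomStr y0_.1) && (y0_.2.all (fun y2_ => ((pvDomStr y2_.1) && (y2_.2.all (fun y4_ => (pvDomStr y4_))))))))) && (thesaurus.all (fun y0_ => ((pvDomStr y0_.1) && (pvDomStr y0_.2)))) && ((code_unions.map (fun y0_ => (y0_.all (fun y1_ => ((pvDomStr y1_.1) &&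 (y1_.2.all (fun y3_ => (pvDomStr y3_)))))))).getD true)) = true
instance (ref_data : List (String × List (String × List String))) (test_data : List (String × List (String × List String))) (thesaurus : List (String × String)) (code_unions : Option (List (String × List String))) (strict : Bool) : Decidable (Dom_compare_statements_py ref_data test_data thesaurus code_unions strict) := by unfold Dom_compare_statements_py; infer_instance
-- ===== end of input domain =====

-- B replaces A's per-code linear scan of code_unions and per-code scan of the other record's
-- codes by a multi-index code -> all containing unions plus per-record group-hit sets, and
-- collects the matched record pairs in a staged pass; equivalence is about the RETURN value.

-- ===== PORT A =====
-- _select_code_union: first (name, members) pair of unions whose member list contains code;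
-- Python's (None, None) pair is rendered as Option.none.
def pvSelectCodeUnion (code : String) (unions : Option (PySem.Dict String (List String))) :
    Option (String × List String) :=
  match unions with
  | none => none
  | some u => u.items.find? (fun gu => gu.2.contains code)

def pvIgnoreStatement (code : String) (thesaurus : PySem.Dict String String)
    (unions : Option (PySem.Dict String (List String))) (strict : Bool) : Bool :=
  if !(thesaurus.contains code) then true
  else if unions.isSome && strict then
    (pvSelectCodeUnion code unions).isNone
  else false

-- body of A's innermost 'for code in all_concs' loop (state = (excess_items, marks))
def pvAStep (thesD : PySem.Dict String String) (unionsD : Option (PySem.Dict String (List String)))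
    (strict : Bool) (ref_concs test_concs : PySem.Set String)
    (st : PySem.Set String × PySem.Dict String (List Int)) (code : String) :
    PySem.Set String × PySem.Dict String (List Int) :=
  if PySem.Set.contains st.1 code then st
  else if pvIgnoreStatement code thesD unionsD strict then (PySem.Set.add st.1 code, st.2)
  else
    let mo : Int × Option (PySem.Set String) :=
      if !(PySem.Set.contains ref_concs code) then (3, some ref_concs)
      else if PySem.Set.contains test_concs code then (1, none)
      else (2, some test_concs)
    let marks := st.2.modify code [] (fun l => l ++ [mo.1])
    match unionsD, mo.2 with
    | some _, some other =>
      match pvSelectCodeUnion code unionsD with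
      | some gu =>
        if other.any (fun x => gu.2.contains x) then
          (st.1, marks.modify code [] (fun l => l.dropLast ++ [1]))
        else (st.1, marks)
      | none => (st.1, marks)
    | _, _ => (st.1, marks)

-- A's 'for rec in ref_data[db]' loop body
def pvARec (thesD : PySem.Dict String String) (unionsD : Option (PySem.Dict String (List String)))
    (strict : Bool) (trecsD : PySem.Dict String (List String))
    (st : PySem.Set String × PySem.Dict String (List Int)) (recp : String × List String) :
    PySem.Set String × PySem.Dict String (List Int) :=
  match trecsD.get? recp.1 with
  | none => st
  | some test_codes =>
    let ref_concs := PySem.Set.ofList recp.2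
    let test_concs := PySem.Set.ofList test_codes
    (PySem.Set.union ref_concs test_concs).foldl
      (pvAStep thesD unionsD strict ref_concs test_concs) st

-- A's 'for db in ref_data' loop body
def pvADb (testD : PySem.Dict String (List (String × List String)))
    (thesD : PySem.Dict String String) (unionsD : Option (PySem.Dict String (List String)))
    (strict : Bool) (st : PySem.Set String × PySem.Dict String (List Int))
    (dbp : String × List (String × List String)) :
    PySem.Set String × PySem.Dict String (List Int) :=
  match testD.get? dbp.1 with
  | none => st
  | some trecs =>
    (PySem.Dict.ofList dbp.2).items.foldl
      (pvARec thesD unionsD strict (PySem.Dict.ofList trecs)) st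

def compare_statements_py (ref_data : List (String × List (String × List String))) (test_data : List (String × List (String × List String))) (thesaurus : List (String × String)) (code_unions : Option (List (String × List String))) (strict : Bool) : List (String × List Int) :=
  ((PySem.Dict.ofList ref_data).items.foldl
    (pvADb (PySem.Dict.ofList test_data) (PySem.Dict.ofList thesaurus)
      (code_unions.map PySem.Dict.ofList) strict)
    (PySem.Set.empty, PySem.Dict.empty)).2.items

-- ===== PORT B =====
-- multi-index: code -> names of ALL unions containing it, in union order
-- (Python: unions_of.setdefault(c, []).append(name) = modify c [] (· ++ [name]))
def pvUnionsOf (cu : PySem.Dict String (List String)) : PySem.Dict String (List String) :=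
  cu.items.foldl
    (fun d gu => gu.2.foldl (fun d c => d.modify c [] (fun l => l ++ [gu.1])) d)
    PySem.Dict.empty

-- staged pass: the matched (ref codes, test codes) record pairs, as sets
def pvPairOf (trecsD : PySem.Dict String (List String)) (recp : String × List String) :
    Option (PySem.Set String × PySem.Set String) :=
  (trecsD.get? recp.1).map (fun tcodes => (PySem.Set.ofList recp.2, PySem.Set.ofList tcodes))

def pvDbPairs (testD : PySem.Dict String (List (String × List String)))
    (dbp : String × List (String × List String)) :
    List (PySem.Set String × PySem.Set String) :=
  match testD.get? dbp.1 with
  | none => []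
  | some trecs => (PySem.Dict.ofList dbp.2).items.filterMap (pvPairOf (PySem.Dict.ofList trecs))

def pvPairs (testD : PySem.Dict String (List (String × List String)))
    (ref_data : List (String × List (String × List String))) :
    List (PySem.Set String × PySem.Set String) :=
  (PySem.Dict.ofList ref_data).items.flatMap (pvDbPairs testD)

-- body of B's innermost loop (marks only; hit sets are per-record inputs)
def pvBStep (thesD : PySem.Dict String String) (idx : PySem.Dict String (List String))
    (hasU strict : Bool) (rc tc ref_hit test_hit : PySem.Set String)
    (marks : PySem.Dict String (List Int)) (code : String) : PySem.Dict String (List Int) :=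
  if !(thesD.contains code) then marks
  else
    let groups := idx.getD code []
    if strict && hasU && groups.isEmpty then marks
    else
      let in_ref := PySem.Set.contains rc code
      let in_test := PySem.Set.contains tc code
      let mark : Int :=
        if in_ref && in_test then 1
        else
          match groups.head? with
          | some g =>
            if PySem.Set.contains (if in_ref then test_hit else ref_hit) g then 1
            else if in_ref then 2 else 3
          | none => if in_ref then 2 else 3
      -- Python's marks.setdefault(code, []).append(mark): marks[code] = marks.get(code, []) + [mark]
      marks.modify code [] (fun l => l ++ [mark])

-- B's 'for ref_concs, test_concs in pairs' loop body
def pvBPair (thesD : PySem.Dict String String) (idx : PySem.Dict String (List String))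
    (hasU strict : Bool) (marks : PySem.Dict String (List Int))
    (pr : PySem.Set String × PySem.Set String) : PySem.Dict String (List Int) :=
  let ref_hit := PySem.Set.ofList (pr.1.flatMap (fun x => idx.getD x []))
  let test_hit := PySem.Set.ofList (pr.2.flatMap (fun x => idx.getD x []))
  (PySem.Set.union pr.1 pr.2).foldl
    (pvBStep thesD idx hasU strict pr.1 pr.2 ref_hit test_hit) marks

def compare_statements_py_alt (ref_data : List (String × List (String × List String))) (test_data : List (String × List (String × List String))) (thesaurus : List (String × String)) (code_unions : Option (List (String × List String))) (strict : Bool) : List (String × List Int) :=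
  let idx : PySem.Dict String (List String) :=
    match code_unions with
    | none => PySem.Dict.empty
    | some cu => pvUnionsOf (PySem.Dict.ofList cu)
  ((pvPairs (PySem.Dict.ofList test_data) ref_data).foldl
    (pvBPair (PySem.Dict.ofList thesaurus) idx code_unions.isSome strict)
    PySem.Dict.empty).items

-- ===== PRECONDITION & SPEC =====
def Spec_compare_statements_py (ref_data : List (String × List (String × List String))) (test_data : List (String × List (String × List String))) (thesaurus : List (String × String)) (code_unions : Option (List (String × List String))) (strict : Bool) (out : List (String × List Int)) : Prop := out = compare_statements_py_alt ref_data test_data thesaurus code_unions strict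
instance (ref_data : List (String × List (String × List String))) (test_data : List (String × List (String × List String))) (thesaurus : List (String × String)) (code_unions : Option (List (String × List String))) (strict : Bool) (out : List (String × List Int)) : Decidable (Spec_compare_statements_py ref_data test_data thesaurus code_unions strict out) := by unfold Spec_compare_statements_py; infer_instance

-- ===== CLAIM (what is proved, stated in full; the proofs are below) =====
def Claim_equal_compare_statements_py : Prop := ∀ (ref_data : List (String × List (String × List String))) (test_data : List (String × List (String × List String))) (thesaurus : List (String × String)) (code_unions : Option (List (String × List String))) (strict : Bool), Dom_compare_statements_py ref_data test_data thesaurus code_unions strict → Spec_compare_statements_py ref_data test_data thesaurus code_unions strict (compare_statements_py ref_data test_data thesaurus code_unions strict)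

-- ===== LEMMAS AND PROOFS =====

def pvFlatPairs (l : List (String × List String)) : List (String × String) :=
  l.flatMap (fun gu => gu.2.map (fun c => (c, gu.1)))

lemma pv_unions_fold_flat (l : List (String × List String)) :
    ∀ d : PySem.Dict String (List String),
    l.foldl (fun d gu => gu.2.foldl (fun d c => d.modify c [] (fun l => l ++ [gu.1])) d) d =
      (pvFlatPairs l).foldl (fun d p => d.modify p.1 [] (fun l => l ++ [p.2])) d := by
  induction l with
  | nil => intro d; rfl
  | cons gu rest ih =>
    intro d
    simp only [pvFlatPairs, List.flatMap_cons, List.foldl_cons, List.foldl_append,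
      List.foldl_map] at *
    rw [ih]

lemma pv_getD_unionsOf (cu : PySem.Dict String (List String)) (code : String) :
    (pvUnionsOf cu).getD code [] =
      ((pvFlatPairs cu.items).filter (fun p => p.1 == code)).map (fun p => p.2) := by
  unfold pvUnionsOf
  rw [pv_unions_fold_flat, PySem.Dict.getD_foldl_modify_append, PySem.Dict.getD_empty]
  simp

lemma pv_find_map_pair (name : String) (cs : List String) (code : String) :
    (cs.map (fun c => (c, name))).find? (fun p => p.1 == code) =
      if code ∈ cs then some (code, name) else none := by
  induction cs with
  | nil => simp
  | cons c cs ih =>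
    by_cases hc : c = code
    · subst hc; simp
    · simp [List.find?_cons, hc, ih, Ne.symm hc]

lemma pv_find_flat (code : String) :
    ∀ l : List (String × List String),
    (pvFlatPairs l).find? (fun p => p.1 == code) =
      (l.find? (fun gu => gu.2.contains code)).map (fun gu => (code, gu.1)) := by
  intro l
  induction l with
  | nil => rfl
  | cons gu rest ih =>
    rw [show pvFlatPairs (gu :: rest) = gu.2.map (fun c => (c, gu.1)) ++ pvFlatPairs rest from
      by simp [pvFlatPairs]]
    rw [List.find?_append, pv_find_map_pair, List.find?_cons]
    by_cases h : code ∈ gu.2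
    · simp [h, List.contains_iff_mem]
    · simp [h, ih, List.contains_iff_mem]

lemma pv_head_unionsOf (cu : PySem.Dict String (List String)) (code : String) :
    ((pvUnionsOf cu).getD code []).head? =
      (pvSelectCodeUnion code (some cu)).map (fun gu => gu.1) := by
  rw [pv_getD_unionsOf, List.head?_map, List.head?_filter, pv_find_flat]
  simp only [pvSelectCodeUnion]
  cases cu.items.find? (fun gu => gu.2.contains code) <;> rfl

lemma pv_mem_unionsOf (cu : PySem.Dict String (List String)) (x g : String) :
    g ∈ (pvUnionsOf cu).getD x [] ↔ ∃ gu ∈ cu.items, gu.1 = g ∧ x ∈ gu.2 := by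
  rw [pv_getD_unionsOf]
  simp only [List.mem_map, List.mem_filter, pvFlatPairs, List.mem_flatMap]
  constructor
  · rintro ⟨p, ⟨⟨gu, hgu, c, hc, rfl⟩, hfst⟩, rfl⟩
    have hcx : c = x := by simpa using hfst
    exact ⟨gu, hgu, rfl, hcx ▸ hc⟩
  · rintro ⟨gu, hgu, rfl, hx⟩
    exact ⟨(x, gu.1), ⟨⟨gu, hgu, x, hx, rfl⟩, by simp⟩, rfl⟩

-- hit-set membership
lemma pv_mem_hit (idx : PySem.Dict String (List String)) (s : PySem.Set String) (g : String) :
    PySem.Set.contains (PySem.Set.ofList (s.flatMap (fun x => idx.getD x []))) g = true ↔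
      ∃ x ∈ s, g ∈ idx.getD x [] := by
  rw [PySem.Set.contains_iff, PySem.Set.mem_ofList, List.mem_flatMap]

-- select finds an entry of a key-nodup dict: membership in the index entry is membership in
-- THAT union's member list
lemma pv_hUpg (cu : PySem.Dict String (List String)) (hnd : cu.keys.Nodup) :
    ∀ (c : String) (gu : String × List String) (x : String),
    pvSelectCodeUnion c (some cu) = some gu →
      (gu.1 ∈ (pvUnionsOf cu).getD x [] ↔ x ∈ gu.2) := by
  intro c gu x hsel
  have hgu : gu ∈ cu.items := List.mem_of_find?_eq_some hsel
  rw [pv_mem_unionsOf]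
  constructor
  · rintro ⟨gu', hgu', he, hx⟩
    have e1 : cu.get? gu.1 = some gu.2 :=
      PySem.Dict.get?_of_mem_items cu (by simpa using hgu) hnd
    have e2 : cu.get? gu.1 = some gu'.2 := by
      have h := PySem.Dict.get?_of_mem_items cu (k := gu'.1) (v := gu'.2)
        (by simpa using hgu') hnd
      rwa [he] at h
    have : gu'.2 = gu.2 := by rw [e1] at e2; exact (Option.some.inj e2).symm
    exact this ▸ hx
  · intro hx
    exact ⟨gu, hgu, rfl, hx⟩

-- A's append-then-overwrite-last equals a single append of the final mark
lemma pv_modify_modify (d : PySem.Dict String (List Int)) (k : String) (a : Int) :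
    (d.modify k [] (fun l => l ++ [a])).modify k [] (fun l => l.dropLast ++ [(1:Int)]) =
      d.modify k [] (fun l => l ++ [(1:Int)]) := by
  simp [PySem.Dict.modify, PySem.Dict.getD_insert_self, PySem.Dict.insert_insert_self]

-- if A ignores a code, B skips it
lemma pv_skip_of_ignore (thesD : PySem.Dict String String)
    (unionsD : Option (PySem.Dict String (List String)))
    (idx : PySem.Dict String (List String)) (strict : Bool)
    (hSel : ∀ c, ((idx.getD c []).head?) = (pvSelectCodeUnion c unionsD).map (fun gu => gu.1))
    (rc tc rh th : PySem.Set String) (marks : PySem.Dict String (List Int)) (code : String)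
    (hig : pvIgnoreStatement code thesD unionsD strict = true) :
    pvBStep thesD idx unionsD.isSome strict rc tc rh th marks code = marks := by
  by_cases ht : thesD.contains code = true
  · cases unionsD with
    | none => simp [pvIgnoreStatement, ht] at hig
    | some u =>
      simp only [pvIgnoreStatement, ht, Bool.not_true, Bool.false_eq_true, if_false,
        Option.isSome_some, Bool.true_and] at hig
      by_cases hs : strict = true
      · simp only [hs, if_true] at hig
        have hnone : pvSelectCodeUnion code (some u) = none := by
          cases h : pvSelectCodeUnion code (some u) with
          | none => rfl
          | some gu => rw [h] at hig; simp at hig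
        have hempty : idx.getD code [] = [] := by
          have := hSel code
          rw [hnone] at this
          simpa [List.head?_eq_none_iff] using this
        simp [pvBStep, ht, hempty, hs]
      · simp [hs] at hig
  · simp [pvBStep, ht]

-- the per-code step lemma: A's step tracks B's step and preserves the excess invariant
lemma pv_step_eq (thesD : PySem.Dict String String)
    (unionsD : Option (PySem.Dict String (List String)))
    (idx : PySem.Dict String (List String)) (strict : Bool)
    (hSel : ∀ c, ((idx.getD c []).head?) = (pvSelectCodeUnion c unionsD).map (fun gu => gu.1))
    (hUpg : ∀ c gu x, pvSelectCodeUnion c unionsD = some gu →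
      (gu.1 ∈ idx.getD x [] ↔ x ∈ gu.2))
    (rc tc rh th : PySem.Set String)
    (hRH : ∀ g, rh.contains g = true ↔ ∃ x ∈ rc, g ∈ idx.getD x [])
    (hTH : ∀ g, th.contains g = true ↔ ∃ x ∈ tc, g ∈ idx.getD x [])
    (excess : PySem.Set String) (marks : PySem.Dict String (List Int)) (code : String)
    (hInv : ∀ c ∈ excess, pvIgnoreStatement c thesD unionsD strict = true) :
    (pvAStep thesD unionsD strict rc tc (excess, marks) code).2 =
      pvBStep thesD idx unionsD.isSome strict rc tc rh th marks code ∧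
    (∀ c ∈ (pvAStep thesD unionsD strict rc tc (excess, marks) code).1,
      pvIgnoreStatement c thesD unionsD strict = true) := by
  by_cases hex : code ∈ excess
  · have hA : pvAStep thesD unionsD strict rc tc (excess, marks) code = (excess, marks) := by
      simp [pvAStep, PySem.Set.contains, hex]
    rw [hA]
    exact ⟨(pv_skip_of_ignore thesD unionsD idx strict hSel rc tc rh th marks code
      (hInv code hex)).symm, hInv⟩
  · by_cases hig : pvIgnoreStatement code thesD unionsD strict = true
    · have hA : pvAStep thesD unionsD strict rc tc (excess, marks) code =
          (PySem.Set.add excess code, marks) := by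
        simp [pvAStep, PySem.Set.contains, hex, hig]
      rw [hA]
      refine ⟨(pv_skip_of_ignore thesD unionsD idx strict hSel rc tc rh th marks code
        hig).symm, ?_⟩
      intro c hc
      rcases (PySem.Set.mem_add excess code c).mp hc with h | h
      · exact hInv c h
      · subst h; exact hig
    · rw [Bool.not_eq_true] at hig
      have hth : thesD.contains code = true := by
        cases h : thesD.contains code
        · rw [pvIgnoreStatement] at hig; simp [h] at hig
        · rfl
      have key : pvAStep thesD unionsD strict rc tc (excess, marks) code =
          (excess, pvBStep thesD idx unionsD.isSome strict rc tc rh th marks code) := by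
        cases hsel : pvSelectCodeUnion code unionsD with
        | none =>
          have hempty : idx.getD code [] = [] := by
            have := hSel code
            rw [hsel] at this
            simpa [List.head?_eq_none_iff] using this
          cases unionsD with
          | none =>
            by_cases hr : code ∈ rc <;> by_cases htt : code ∈ tc <;>
              simp [pvAStep, pvBStep, PySem.Set.contains, hex, hig, hth, hr, htt, hempty]
          | some u =>
            have hs : strict = false := by
              cases h : strict
              · rfl
              · rw [pvIgnoreStatement] at hig; simp [hth, h, hsel] at hig
            subst hs
            by_cases hr : code ∈ rc <;> by_cases htt : code ∈ tc <;>
              simp [pvAStep, pvBStep, PySem.Set.contains, hex, hig, hth, hr, htt, hempty, hsel]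
        | some gu =>
          obtain ⟨u, rfl⟩ : ∃ u, unionsD = some u := by
            cases unionsD with
            | none => simp [pvSelectCodeUnion] at hsel
            | some u => exact ⟨u, rfl⟩
          have hhead : (idx.getD code []).head? = some gu.1 := by
            rw [hSel code, hsel]; rfl
          have hne : (idx.getD code []).isEmpty = false := by
            cases h : idx.getD code [] with
            | nil => rw [h] at hhead; simp at hhead
            | cons a tl => simp [h]
          by_cases hr : code ∈ rc
          · by_cases htt : code ∈ tc
            · simp [pvAStep, pvBStep, PySem.Set.contains, hex, hig, hth, hr, htt, hne, hhead,
                hsel]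
            · have hup : gu.1 ∈ th ↔ ∃ x ∈ tc, x ∈ gu.2 := by
                rw [← PySem.Set.contains_iff, hTH gu.1]
                exact ⟨fun ⟨x, hx, hm⟩ => ⟨x, hx, (hUpg code gu x hsel).mp hm⟩,
                       fun ⟨x, hx, hm⟩ => ⟨x, hx, (hUpg code gu x hsel).mpr hm⟩⟩
              by_cases hany : ∃ x ∈ tc, x ∈ gu.2
              · have hmem : gu.1 ∈ th := hup.mpr hany
                simp [pvAStep, pvBStep, PySem.Set.contains, hex, hig, hth, hr, htt, hne,
                  hhead, hsel, hmem, hany, pv_modify_modify]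
              · have hmem : gu.1 ∉ th := fun hm => hany (hup.mp hm)
                simp [pvAStep, pvBStep, PySem.Set.contains, hex, hig, hth, hr, htt, hne,
                  hhead, hsel, hmem, hany]
          · have hup : gu.1 ∈ rh ↔ ∃ x ∈ rc, x ∈ gu.2 := by
              rw [← PySem.Set.contains_iff, hRH gu.1]
              exact ⟨fun ⟨x, hx, hm⟩ => ⟨x, hx, (hUpg code gu x hsel).mp hm⟩,
                     fun ⟨x, hx, hm⟩ => ⟨x, hx, (hUpg code gu x hsel).mpr hm⟩⟩
            by_cases hany : ∃ x ∈ rc, x ∈ gu.2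
            · have hmem : gu.1 ∈ rh := hup.mpr hany
              simp [pvAStep, pvBStep, PySem.Set.contains, hex, hig, hth, hr, hne,
                hhead, hsel, hmem, hany, pv_modify_modify]
            · have hmem : gu.1 ∉ rh := fun hm => hany (hup.mp hm)
              simp [pvAStep, pvBStep, PySem.Set.contains, hex, hig, hth, hr, hne,
                hhead, hsel, hmem, hany]
      rw [key]
      exact ⟨rfl, hInv⟩

-- the inner 'for code in all_concs' fold
lemma pv_setfold_eq (thesD : PySem.Dict String String)
    (unionsD : Option (PySem.Dict String (List String)))
    (idx : PySem.Dict String (List String)) (strict : Bool)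
    (hSel : ∀ c, ((idx.getD c []).head?) = (pvSelectCodeUnion c unionsD).map (fun gu => gu.1))
    (hUpg : ∀ c gu x, pvSelectCodeUnion c unionsD = some gu →
      (gu.1 ∈ idx.getD x [] ↔ x ∈ gu.2))
    (rc tc rh th : PySem.Set String)
    (hRH : ∀ g, rh.contains g = true ↔ ∃ x ∈ rc, g ∈ idx.getD x [])
    (hTH : ∀ g, th.contains g = true ↔ ∃ x ∈ tc, g ∈ idx.getD x [])
    (codes : List String) :
    ∀ (excess : PySem.Set String) (marks : PySem.Dict String (List Int)),
      (∀ c ∈ excess, pvIgnoreStatement c thesD unionsD strict = true) →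
      (codes.foldl (pvAStep thesD unionsD strict rc tc) (excess, marks)).2 =
        codes.foldl (pvBStep thesD idx unionsD.isSome strict rc tc rh th) marks ∧
      (∀ c ∈ (codes.foldl (pvAStep thesD unionsD strict rc tc) (excess, marks)).1,
        pvIgnoreStatement c thesD unionsD strict = true) := by
  induction codes with
  | nil => exact fun e m h => ⟨rfl, h⟩
  | cons c rest ih =>
    intro e m h
    obtain ⟨h1, h2⟩ := pv_step_eq thesD unionsD idx strict hSel hUpg rc tc rh th hRH hTH
      e m c h
    obtain ⟨ha, hb⟩ := ih (pvAStep thesD unionsD strict rc tc (e, m) c).1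
      (pvAStep thesD unionsD strict rc tc (e, m) c).2 h2
    simp only [List.foldl_cons]
    rw [← h1]
    constructor
    · simpa using ha
    · simpa using hb

-- one matched record pair
lemma pv_pair_eq (thesD : PySem.Dict String String)
    (unionsD : Option (PySem.Dict String (List String)))
    (idx : PySem.Dict String (List String)) (strict : Bool)
    (hSel : ∀ c, ((idx.getD c []).head?) = (pvSelectCodeUnion c unionsD).map (fun gu => gu.1))
    (hUpg : ∀ c gu x, pvSelectCodeUnion c unionsD = some gu →
      (gu.1 ∈ idx.getD x [] ↔ x ∈ gu.2))
    (rc tc : PySem.Set String)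
    (excess : PySem.Set String) (marks : PySem.Dict String (List Int))
    (hInv : ∀ c ∈ excess, pvIgnoreStatement c thesD unionsD strict = true) :
    ((PySem.Set.union rc tc).foldl (pvAStep thesD unionsD strict rc tc) (excess, marks)).2 =
      pvBPair thesD idx unionsD.isSome strict marks (rc, tc) ∧
    (∀ c ∈ ((PySem.Set.union rc tc).foldl (pvAStep thesD unionsD strict rc tc)
        (excess, marks)).1,
      pvIgnoreStatement c thesD unionsD strict = true) := by
  exact pv_setfold_eq thesD unionsD idx strict hSel hUpg rc tc
    (PySem.Set.ofList (rc.flatMap (fun x => idx.getD x [])))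
    (PySem.Set.ofList (tc.flatMap (fun x => idx.getD x [])))
    (fun g => pv_mem_hit idx rc g) (fun g => pv_mem_hit idx tc g)
    (PySem.Set.union rc tc) excess marks hInv

-- the 'for rec in ref_data[db]' fold vs B's filterMap'd pairs
lemma pv_recfold_eq (thesD : PySem.Dict String String)
    (unionsD : Option (PySem.Dict String (List String)))
    (idx : PySem.Dict String (List String)) (strict : Bool)
    (hSel : ∀ c, ((idx.getD c []).head?) = (pvSelectCodeUnion c unionsD).map (fun gu => gu.1))
    (hUpg : ∀ c gu x, pvSelectCodeUnion c unionsD = some gu →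
      (gu.1 ∈ idx.getD x [] ↔ x ∈ gu.2))
    (trecsD : PySem.Dict String (List String)) (recps : List (String × List String)) :
    ∀ (st : PySem.Set String × PySem.Dict String (List Int)),
      (∀ c ∈ st.1, pvIgnoreStatement c thesD unionsD strict = true) →
      (recps.foldl (pvARec thesD unionsD strict trecsD) st).2 =
        (recps.filterMap (pvPairOf trecsD)).foldl
          (pvBPair thesD idx unionsD.isSome strict) st.2 ∧
      (∀ c ∈ (recps.foldl (pvARec thesD unionsD strict trecsD) st).1,
        pvIgnoreStatement c thesD unionsD strict = true) := by
  induction recps with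
  | nil => exact fun st h => ⟨rfl, h⟩
  | cons recp rest ih =>
    rintro ⟨e, m⟩ h
    cases hsel : trecsD.get? recp.1 with
    | none =>
      have hp : pvPairOf trecsD recp = none := by simp [pvPairOf, hsel]
      have hr : pvARec thesD unionsD strict trecsD (e, m) recp = (e, m) := by
        simp [pvARec, hsel]
      simp only [List.foldl_cons, List.filterMap_cons, hp, hr]
      exact ih (e, m) h
    | some test_codes =>
      have hp : pvPairOf trecsD recp =
          some (PySem.Set.ofList recp.2, PySem.Set.ofList test_codes) := by
        simp [pvPairOf, hsel]
      have hr : pvARec thesD unionsD strict trecsD (e, m) recp =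
          (PySem.Set.union (PySem.Set.ofList recp.2) (PySem.Set.ofList test_codes)).foldl
            (pvAStep thesD unionsD strict (PySem.Set.ofList recp.2)
              (PySem.Set.ofList test_codes)) (e, m) := by
        simp [pvARec, hsel]
      simp only [List.foldl_cons, List.filterMap_cons, hp, hr]
      obtain ⟨ha, hb⟩ := pv_pair_eq thesD unionsD idx strict hSel hUpg
        (PySem.Set.ofList recp.2) (PySem.Set.ofList test_codes) e m h
      obtain ⟨hc, hd⟩ := ih _ hb
      refine ⟨?_, hd⟩
      rw [hc, ha]

-- the 'for db in ref_data' fold vs B's staged pair list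
lemma pv_dbfold_eq (testD : PySem.Dict String (List (String × List String)))
    (thesD : PySem.Dict String String)
    (unionsD : Option (PySem.Dict String (List String)))
    (idx : PySem.Dict String (List String)) (strict : Bool)
    (hSel : ∀ c, ((idx.getD c []).head?) = (pvSelectCodeUnion c unionsD).map (fun gu => gu.1))
    (hUpg : ∀ c gu x, pvSelectCodeUnion c unionsD = some gu →
      (gu.1 ∈ idx.getD x [] ↔ x ∈ gu.2))
    (dbps : List (String × List (String × List String))) :
    ∀ (st : PySem.Set String × PySem.Dict String (List Int)),
      (∀ c ∈ st.1, pvIgnoreStatement c thesD unionsD strict = true) →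
      (dbps.foldl (pvADb testD thesD unionsD strict) st).2 =
        (dbps.flatMap (pvDbPairs testD)).foldl
          (pvBPair thesD idx unionsD.isSome strict) st.2 ∧
      (∀ c ∈ (dbps.foldl (pvADb testD thesD unionsD strict) st).1,
        pvIgnoreStatement c thesD unionsD strict = true) := by
  induction dbps with
  | nil => exact fun st h => ⟨rfl, h⟩
  | cons dbp rest ih =>
    rintro ⟨e, m⟩ h
    cases hsel : testD.get? dbp.1 with
    | none =>
      have hp : pvDbPairs testD dbp = [] := by simp [pvDbPairs, hsel]
      have hr : pvADb testD thesD unionsD strict (e, m) dbp = (e, m) := by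
        simp [pvADb, hsel]
      simp only [List.foldl_cons, List.flatMap_cons, List.foldl_append, hp, hr]
      exact ih (e, m) h
    | some trecs =>
      have hp : pvDbPairs testD dbp =
          (PySem.Dict.ofList dbp.2).items.filterMap (pvPairOf (PySem.Dict.ofList trecs)) := by
        simp [pvDbPairs, hsel]
      have hr : pvADb testD thesD unionsD strict (e, m) dbp =
          (PySem.Dict.ofList dbp.2).items.foldl
            (pvARec thesD unionsD strict (PySem.Dict.ofList trecs)) (e, m) := by
        simp [pvADb, hsel]
      simp only [List.foldl_cons, List.flatMap_cons, List.foldl_append, hp, hr]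
      obtain ⟨ha, hb⟩ := pv_recfold_eq thesD unionsD idx strict hSel hUpg
        (PySem.Dict.ofList trecs) (PySem.Dict.ofList dbp.2).items (e, m) h
      obtain ⟨hc, hd⟩ := ih _ hb
      refine ⟨?_, hd⟩
      rw [hc, ha]

-- ===== VERDICT (by name: the statement is the Claim_ definition above) =====
theorem compare_statements_py_spec : Claim_equal_compare_statements_py := by
  intro ref_data test_data thesaurus code_unions strict _
  unfold Spec_compare_statements_py compare_statements_py compare_statements_py_alt pvPairs
  have hempty : ∀ c ∈ (PySem.Set.empty : PySem.Set String),
      pvIgnoreStatement c (PySem.Dict.ofList thesaurus) (code_unions.map PySem.Dict.ofList)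
        strict = true := by
    intro c hc
    simp [PySem.Set.empty] at hc
  cases code_unions with
  | none =>
    have hSel : ∀ c, (((PySem.Dict.empty : PySem.Dict String (List String)).getD c []).head?) =
        (pvSelectCodeUnion c (Option.map PySem.Dict.ofList none)).map (fun gu => gu.1) := by
      intro c; rfl
    have hUpg : ∀ c gu x, pvSelectCodeUnion c (Option.map PySem.Dict.ofList none) = some gu →
        (gu.1 ∈ (PySem.Dict.empty : PySem.Dict String (List String)).getD x [] ↔ x ∈ gu.2) := by
      intro c gu x h
      simp [pvSelectCodeUnion] at h
    have h := pv_dbfold_eq (PySem.Dict.ofList test_data) (PySem.Dict.ofList thesaurus)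
      (Option.map PySem.Dict.ofList none) PySem.Dict.empty strict hSel hUpg
      (PySem.Dict.ofList ref_data).items (PySem.Set.empty, PySem.Dict.empty) hempty
    exact congrArg PySem.Dict.items h.1
  | some cu =>
    have hSel : ∀ c, (((pvUnionsOf (PySem.Dict.ofList cu)).getD c []).head?) =
        (pvSelectCodeUnion c (Option.map PySem.Dict.ofList (some cu))).map (fun gu => gu.1) := by
      intro c
      simpa using pv_head_unionsOf (PySem.Dict.ofList cu) c
    have hUpg : ∀ c gu x, pvSelectCodeUnion c (Option.map PySem.Dict.ofList (some cu)) = some gu →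
        (gu.1 ∈ (pvUnionsOf (PySem.Dict.ofList cu)).getD x [] ↔ x ∈ gu.2) := by
      intro c gu x h
      exact pv_hUpg (PySem.Dict.ofList cu) (PySem.Dict.nodup_keys_ofList cu) c gu x
        (by simpa using h)
    have h := pv_dbfold_eq (PySem.Dict.ofList test_data) (PySem.Dict.ofList thesaurus)
      (Option.map PySem.Dict.ofList (some cu)) (pvUnionsOf (PySem.Dict.ofList cu)) strict
      hSel hUpg (PySem.Dict.ofList ref_data).items (PySem.Set.empty, PySem.Dict.empty) hempty
    exact congrArg PySem.Dict.items h.1
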